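-- pv_equiv track=rewrite | github.com/hmartiro/selfgraph | selfgraph/core/alias.py | is_not_an_alias
-- ===== SOURCE A (Python) =====
-- def is_not_an_alias(p1, p2, not_an_alias, person_alias):
--     # check for alias group head name
--     p1_alias = p1
--     p2_alias = p2
--     for aliases in person_alias:
--         if p1 in aliases:
--             p1_alias = aliases[0]
--         if p2 in aliases:
--             p2_alias = aliases[0]
--     if p1_alias in not_an_alias:
--         if p2_alias in not_an_alias[p1_alias]:
--             return True
--
--     return False
-- ===== SOURCE B (Python) =====
-- def is_not_an_alias(p1, p2, not_an_alias, person_alias):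
--     # Resolve a name by recursive back-to-front search: the first group
--     # (from the end) containing the name wins, which equals the forward
--     # last-match-wins rule; default to the name itself.
--     def resolve(p, i):
--         if i < 0:
--             return p
--         g = person_alias[i]
--         return g[0] if p in g else resolve(p, i - 1)
--
--     n = len(person_alias) - 1
--     return resolve(p2, n) in not_an_alias.get(resolve(p1, n), ())
-- ===== Notes on version B (the rewrite author's own statement) =====
-- stated objective: alternative
-- what changed: Replaces A's exhaustive forward loop tracking two running heads with a recursive back-to-front search per name that stops at the first matching group (first match in reverse = last match forward), then one dict .get membership test.
import Mathlib
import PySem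

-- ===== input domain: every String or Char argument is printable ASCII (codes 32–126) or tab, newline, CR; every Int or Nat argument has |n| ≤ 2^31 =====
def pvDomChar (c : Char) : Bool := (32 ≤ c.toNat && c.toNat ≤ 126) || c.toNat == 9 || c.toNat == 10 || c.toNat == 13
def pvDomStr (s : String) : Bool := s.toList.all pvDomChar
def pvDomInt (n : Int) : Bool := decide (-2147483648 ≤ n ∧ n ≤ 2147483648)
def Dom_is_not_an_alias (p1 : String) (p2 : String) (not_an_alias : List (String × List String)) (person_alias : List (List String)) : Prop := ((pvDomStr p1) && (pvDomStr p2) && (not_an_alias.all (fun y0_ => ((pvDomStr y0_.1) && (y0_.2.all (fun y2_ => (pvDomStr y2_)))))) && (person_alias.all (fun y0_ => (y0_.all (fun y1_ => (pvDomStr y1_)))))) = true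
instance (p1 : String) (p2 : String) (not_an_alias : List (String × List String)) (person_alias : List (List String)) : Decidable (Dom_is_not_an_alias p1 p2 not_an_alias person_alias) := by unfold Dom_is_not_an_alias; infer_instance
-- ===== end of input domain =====

-- B replaces A's exhaustive forward scan tracking two running heads with a
-- recursive back-to-front search per name that stops at the first match
-- (alternative decomposition, same worst-case cost).

-- ===== PORT A =====
-- A scans every group forward, updating the tracked head for p1/p2 on each
-- match (aliases[0] is only read under the membership guard, so headD is exact).
def is_not_an_alias (p1 : String) (p2 : String) (not_an_alias : List (String × List String)) (person_alias : List (List String)) : Bool :=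
  let st := person_alias.foldl (fun (s : String × String) aliases =>
    (if aliases.contains p1 then aliases.headD s.1 else s.1,
     if aliases.contains p2 then aliases.headD s.2 else s.2)) (p1, p2)
  match (PySem.Dict.mk not_an_alias).get? st.1 with
  | some l => l.contains st.2
  | none => false

-- ===== PORT B =====
-- Source B's resolve recurses on the index i from the end down to -1; ported as
-- structural recursion on the reversed group list (exact: step i visits
-- person_alias[i], i.e. the groups in back-to-front order, stopping at the
-- first containing group; g[0] is only read under the membership guard).
def pvResolve (p : String) : List (List String) → String
  | [] => p
  | g :: rest => if g.contains p then g.headD p else pvResolve p rest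

def is_not_an_alias_alt (p1 : String) (p2 : String) (not_an_alias : List (String × List String)) (person_alias : List (List String)) : Bool :=
  let rev := person_alias.reverse
  match (PySem.Dict.mk not_an_alias).get? (pvResolve p1 rev) with
  | some l => l.contains (pvResolve p2 rev)
  | none => false

-- ===== PRECONDITION & SPEC =====
def Spec_is_not_an_alias (p1 : String) (p2 : String) (not_an_alias : List (String × List String)) (person_alias : List (List String)) (out : Bool) : Prop := out = is_not_an_alias_alt p1 p2 not_an_alias person_alias
instance (p1 : String) (p2 : String) (not_an_alias : List (String × List String)) (person_alias : List (List String)) (out : Bool) : Decidable (Spec_is_not_an_alias p1 p2 not_an_alias person_alias out) := by unfold Spec_is_not_an_alias; infer_instance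

-- ===== CLAIM (what is proved, stated in full; the proofs are below) =====
def Claim_equal_is_not_an_alias : Prop := ∀ (p1 : String) (p2 : String) (not_an_alias : List (String × List String)) (person_alias : List (List String)), Dom_is_not_an_alias p1 p2 not_an_alias person_alias → Spec_is_not_an_alias p1 p2 not_an_alias person_alias (is_not_an_alias p1 p2 not_an_alias person_alias)

-- ===== LEMMAS AND PROOFS =====

-- pvResolve with an arbitrary default, to generalize the fold's accumulator.
def pvRes' (p s : String) : List (List String) → String
  | [] => s
  | g :: rest => if g.contains p then g.headD s else pvRes' p s rest

-- A's forward fold over l.reverse equals the early-exit search over l: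
-- the first match from the back is the last match from the front.
theorem foldl_rev_res' (p : String) (l : List (List String)) :
    ∀ s : String,
      l.reverse.foldl (fun s g => if g.contains p then g.headD s else s) s
        = pvRes' p s l := by
  induction l with
  | nil => intro s; rfl
  | cons g t ih =>
      intro s
      rw [List.reverse_cons, List.foldl_append, List.foldl_cons, List.foldl_nil]
      have e : pvRes' p s (g :: t) = if g.contains p then g.headD s else pvRes' p s t := rfl
      by_cases h : g.contains p
      · rw [if_pos h, e, if_pos h]
        cases g with
        | nil => simp at h
        | cons a gs => rfl
      · rw [if_neg h, ih, e, if_neg h]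

-- With default p the generalized search is exactly pvResolve.
theorem res'_self (p : String) (l : List (List String)) :
    pvRes' p p l = pvResolve p l := by
  induction l with
  | nil => rfl
  | cons g t ih => simp only [pvRes', pvResolve, ih]

-- The pair fold splits into two independent single-name folds.
theorem foldl_pair_split (p1 p2 : String) (l : List (List String)) :
    ∀ s : String × String,
      l.foldl (fun (s : String × String) aliases =>
        (if aliases.contains p1 then aliases.headD s.1 else s.1,
         if aliases.contains p2 then aliases.headD s.2 else s.2)) s
        = (l.foldl (fun s g => if g.contains p1 then g.headD s else s) s.1,
           l.foldl (fun s g => if g.contains p2 then g.headD s else s) s.2) := by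
  induction l with
  | nil => intro s; rfl
  | cons g t ih =>
      intro s
      rw [List.foldl_cons, List.foldl_cons, List.foldl_cons, ih]

-- ===== VERDICT (by name: the statement is the Claim_ definition above) =====
theorem is_not_an_alias_spec : Claim_equal_is_not_an_alias := by
  intro p1 p2 na pa _
  unfold Spec_is_not_an_alias is_not_an_alias is_not_an_alias_alt
  have h1 := foldl_rev_res' p1 pa.reverse p1
  have h2 := foldl_rev_res' p2 pa.reverse p2
  rw [List.reverse_reverse, res'_self] at h1 h2
  simp only [foldl_pair_split, h1, h2]
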